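-- pv_equiv track=rewrite | github.com/ndelrossi7/advent-of-code-2019 | dec_4/dec4_solution.py | passwords
-- ===== SOURCE A (Python) =====
-- def passwords(start, end):
--     counter = 0
--     for i in range(start, end+1):
--         asc = True
--         consec = False
--         prev = ''
--         for char in str(i):
--             if char < prev:
--                 asc = False
--                 break
--             if char == prev:
--                 consec = True
--             prev = char
--         if asc == True and consec == True:
--             counter += 1
--     return counter
-- ===== SOURCE B (Python) =====
-- def passwords(start, end):
--     # valid password: its str equals its own sort (digits never descend)
--     # and some adjacent pair of characters is equal
--     return sum(
--         1
--         for i in range(start, end + 1)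
--         if (s := str(i)) == ''.join(sorted(s)) and any(a == b for a, b in zip(s, s[1:]))
--     )
-- ===== Notes on version B (the rewrite author's own statement) =====
-- stated objective: idiomatic
-- what changed: Replaces A's stateful inner scan (asc/consec flags, prev accumulator, early break) by a declarative per-number test -- the string equals its own sort and some zipped adjacent pair is equal -- folded into a single sum-over-generator expression.
import Mathlib
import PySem

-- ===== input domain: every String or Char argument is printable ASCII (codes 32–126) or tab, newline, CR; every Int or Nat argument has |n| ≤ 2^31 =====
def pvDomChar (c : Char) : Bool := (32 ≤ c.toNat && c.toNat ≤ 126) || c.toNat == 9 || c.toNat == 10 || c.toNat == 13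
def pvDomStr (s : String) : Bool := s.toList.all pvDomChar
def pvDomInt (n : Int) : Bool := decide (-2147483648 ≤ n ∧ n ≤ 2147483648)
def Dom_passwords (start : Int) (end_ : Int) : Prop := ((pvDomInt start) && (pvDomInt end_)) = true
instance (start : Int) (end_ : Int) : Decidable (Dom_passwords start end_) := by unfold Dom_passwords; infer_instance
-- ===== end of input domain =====

-- B replaces A's stateful inner scan (asc/consec flags, prev accumulator, early break) by a
-- declarative per-number test (string equals its own sort, and some zipped adjacent pair is
-- equal) summed over the range; objective: idiomatic, same asymptotic cost.

-- ===== PORT A =====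
-- Python's `<` on strings: lexicographic comparison by code point (exact; hand-ported,
-- used here only on single-character strings and the initial empty `prev`).
def pyStrLt : List Char → List Char → Bool
  | _, [] => false
  | [], _ :: _ => true
  | a :: as, b :: bs => if a < b then true else if b < a then false else pyStrLt as bs

-- A's inner `for char in str(i)` loop: state (prev, consec); first component of the
-- result is `asc` (false = the loop broke), second is `consec`.
def ascScan : List Char → List Char → Bool → Bool × Bool
  | [], _, consec => (true, consec)
  | c :: rest, prev, consec =>
    if pyStrLt [c] prev then (false, consec)
    else ascScan rest [c] (consec || ([c] == prev))

def passwords (start : Int) (end_ : Int) : Int :=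
  (PySem.List.pyRange start (end_ + 1) 1).foldl
    (fun counter i =>
      let r := ascScan (PySem.Int.toChars i) [] false
      if r.1 && r.2 then counter + 1 else counter) 0

-- ===== PORT B =====
-- `(s := str(i)) == ''.join(sorted(s)) and any(a == b for a, b in zip(s, s[1:]))`
def bCond (i : Int) : Bool :=
  let s := PySem.Int.toChars i
  (s == PySem.List.sorted s (fun c => c)) &&
    ((s.zip (PySem.List.slice s (some 1) none)).any fun p => p.1 == p.2)

def passwords_alt (start : Int) (end_ : Int) : Int :=
  ((PySem.List.pyRange start (end_ + 1) 1).map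
    (fun i => if bCond i then (1 : Int) else 0)).foldl (· + ·) 0

-- ===== PRECONDITION & SPEC =====
def Spec_passwords (start : Int) (end_ : Int) (out : Int) : Prop := out = passwords_alt start end_
instance (start : Int) (end_ : Int) (out : Int) : Decidable (Spec_passwords start end_ out) := by unfold Spec_passwords; infer_instance

-- ===== CLAIM (what is proved, stated in full; the proofs are below) =====
def Claim_equal_passwords : Prop := ∀ (start : Int) (end_ : Int), Dom_passwords start end_ → Spec_passwords start end_ (passwords start end_)

-- ===== LEMMAS AND PROOFS =====

-- adjacent characters never descend
def nondec : List Char → Bool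
  | [] => true
  | [_] => true
  | a :: b :: r => (a ≤ b : Bool) && nondec (b :: r)

-- some adjacent pair of characters is equal
def adjEq : List Char → Bool
  | a :: b :: r => (a == b) || adjEq (b :: r)
  | _ => false

theorem scan_eq (s : List Char) : ∀ (p : Char) (c : Bool),
    ((ascScan s [p] c).1 && (ascScan s [p] c).2) = (nondec (p :: s) && (c || adjEq (p :: s))) := by
  induction s with
  | nil => intro p c; simp [ascScan, nondec, adjEq]
  | cons d rest ih =>
    intro p c
    by_cases hdp : d < p
    · simp [ascScan, pyStrLt, hdp, nondec, not_le.mpr hdp]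
    · have hpd : p ≤ d := not_lt.mp hdp
      simp only [ascScan, pyStrLt, if_neg hdp, ite_self, Bool.false_eq_true, if_false]
      rw [ih]
      by_cases hd : d = p
      · subst hd
        simp [nondec, adjEq]
      · have h1 : ([d] == [p]) = false := by simp [hd]
        have h2 : (p == d) = false := by simp [Ne.symm hd]
        simp [nondec, adjEq, hpd, h1, h2]

theorem scan_top (s : List Char) :
    ((ascScan s [] false).1 && (ascScan s [] false).2) = (nondec s && adjEq s) := by
  cases s with
  | nil => simp [ascScan, nondec, adjEq]
  | cons c rest =>
    have : ascScan (c :: rest) [] false = ascScan rest [c] false := by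
      simp [ascScan, pyStrLt]
    rw [this, scan_eq]
    simp

theorem nondec_iff (s : List Char) : nondec s = true ↔ List.Pairwise (· ≤ ·) s := by
  rw [← List.isChain_iff_pairwise]
  induction s with
  | nil => simp [nondec]
  | cons a t ih =>
    cases t with
    | nil => simp [nondec]
    | cons b r =>
      simp only [nondec, Bool.and_eq_true, decide_eq_true_eq, List.isChain_cons_cons]
      rw [ih]

theorem sorted_eq_iff (s : List Char) :
    (s == PySem.List.sorted s (fun c => c)) = nondec s := by
  cases hn : nondec s
  · simp only [beq_eq_false_iff_ne, ne_eq]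
    intro h
    have hp : List.Pairwise (fun a b : Char => a ≤ b) (PySem.List.sorted s (fun c => c)) :=
      PySem.List.sorted_pairwise s (fun c => c)
    rw [← h] at hp
    rw [(nondec_iff s).mpr hp] at hn
    exact Bool.false_ne_true hn.symm
  · simp only [beq_iff_eq]
    exact (PySem.List.sorted_eq_self_of_pairwise s (fun c => c) ((nondec_iff s).mp hn)).symm

theorem adj_zip (s : List Char) :
    ((s.zip (PySem.List.slice s (some 1) none)).any fun p => p.1 == p.2) = adjEq s := by
  rw [PySem.List.slice_from_one]
  induction s with
  | nil => rfl
  | cons a t ih =>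
    cases t with
    | nil => rfl
    | cons b r => simp [adjEq, ← ih]

theorem bCond_eq (i : Int) :
    ((ascScan (PySem.Int.toChars i) [] false).1 && (ascScan (PySem.Int.toChars i) [] false).2)
      = bCond i := by
  rw [scan_top, bCond]
  simp only [sorted_eq_iff, adj_zip]

-- ===== VERDICT (by name: the statement is the Claim_ definition above) =====
theorem passwords_spec : Claim_equal_passwords := by
  intro start end_ _
  unfold Spec_passwords passwords passwords_alt
  rw [PySem.List.foldl_add]
  simp only [List.map_id']
  rw [PySem.List.sum_map_ite_one_zero, zero_add]
  have := PySem.List.foldl_count_if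
    (fun i => (ascScan (PySem.Int.toChars i) [] false).1 && (ascScan (PySem.Int.toChars i) [] false).2)
    (PySem.List.pyRange start (end_ + 1) 1) 0
  simp only [zero_add] at this
  rw [this]
  congr 1
  apply List.countP_congr
  intro i _
  simp [bCond_eq i]
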